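-- pv_equiv track=rewrite | github.com/brunothiago/painel_dmp_pc32 | python/base_snapshot_diff.py | _index_rows
-- ===== SOURCE A (Python) =====
-- KEY_FIELD = "num_convenio"
--
-- FALLBACK_KEY_FIELD = "cod_tci"
--
-- def _row_key(row: dict[str, str]) -> str:
--     """Retorna num_convenio como chave; se vazio, usa cod_tci como fallback."""
--     key = (row.get(KEY_FIELD) or "").strip()
--     if not key:
--         key = (row.get(FALLBACK_KEY_FIELD) or "").strip()
--     return key
--
-- def _index_rows(rows: list[dict[str, str]], label: str) -> dict[str, dict[str, str]]:
--     indexed: dict[str, dict[str, str]] = {}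
--     duplicates: list[str] = []
--     missing: int = 0
--
--     for row in rows:
--         key = _row_key(row)
--         if not key:
--             missing += 1
--             continue
--         if key in indexed:
--             duplicates.append(key)
--             continue
--         indexed[key] = row
--
--     if missing:
--         raise ValueError(f"{label}: {missing} linhas sem chave '{KEY_FIELD}' nem '{FALLBACK_KEY_FIELD}'.")
--     if duplicates:
--         examples = ", ".join(sorted(set(duplicates))[:5])
--         raise ValueError(f"{label}: chaves duplicadas: {examples}")
--     return indexed
-- ===== SOURCE B (Python) =====
-- KEY_FIELD = "num_convenio"
--
-- FALLBACK_KEY_FIELD = "cod_tci"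
--
-- def _row_key(row: dict[str, str]) -> str:
--     key = (row.get(KEY_FIELD) or "").strip()
--     if not key:
--         key = (row.get(FALLBACK_KEY_FIELD) or "").strip()
--     return key
--
-- def _index_rows(rows: list[dict[str, str]], label: str) -> dict[str, dict[str, str]]:
--     keys = [_row_key(r) for r in rows]
--
--     missing = keys.count("")
--     if missing:
--         raise ValueError(f"{label}: {missing} linhas sem chave '{KEY_FIELD}' nem '{FALLBACK_KEY_FIELD}'.")
--
--     dup_keys = sorted({k for k in keys if keys.count(k) > 1})
--     if dup_keys:
--         examples = ", ".join(dup_keys[:5])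
--         raise ValueError(f"{label}: chaves duplicadas: {examples}")
--
--     indexed: dict[str, dict[str, str]] = {}
--     for key, row in zip(keys, rows):
--         indexed.setdefault(key, row)
--     return indexed
-- ===== Notes on version B (the rewrite author's own statement) =====
-- stated objective: idiomatic
-- what changed: A's single loop with three interleaved accumulators (index dict, duplicate list, missing counter) is replaced by staged passes: compute all keys up front, check missing with keys.count, detect duplicates with a count-based set comprehension, then build the index with dict.setdefault over zip(keys, rows).
import Mathlib
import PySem

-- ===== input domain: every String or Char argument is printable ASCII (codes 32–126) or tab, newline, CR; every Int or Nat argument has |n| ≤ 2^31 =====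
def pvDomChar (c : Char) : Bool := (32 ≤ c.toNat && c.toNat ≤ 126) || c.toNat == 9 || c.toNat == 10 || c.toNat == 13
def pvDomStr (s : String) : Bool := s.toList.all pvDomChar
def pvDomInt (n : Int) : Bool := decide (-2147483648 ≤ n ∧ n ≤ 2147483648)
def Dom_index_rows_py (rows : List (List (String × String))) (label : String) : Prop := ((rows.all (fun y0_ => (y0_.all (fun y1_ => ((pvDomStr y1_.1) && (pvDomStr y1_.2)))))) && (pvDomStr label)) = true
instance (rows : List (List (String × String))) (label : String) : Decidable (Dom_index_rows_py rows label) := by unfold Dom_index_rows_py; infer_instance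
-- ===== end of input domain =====

-- B restructures A's single three-accumulator loop into staged passes (keys up front,
-- missing check, count-based duplicate set, setdefault index build); objective: idiomatic.
-- Both versions raise ValueError on missing or duplicate keys; those inputs are outside Pre_.

-- ===== PORT A =====
-- _row_key (shared module helper, used verbatim by both Pythons)
def rowKey (row : List (String × String)) : String :=
  let key := PySem.Str.strip (((PySem.Dict.mk row).get? "num_convenio").getD "")
  if key = "" then PySem.Str.strip (((PySem.Dict.mk row).get? "cod_tci").getD "")
  else key

def index_rows_py (rows : List (List (String × String))) (label : String) : List (String × List (String × String)) :=
  let st := rows.foldl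
    (fun (st : PySem.Dict String (List (String × String)) × List String × Int) row =>
      let key := rowKey row
      if key = "" then (st.1, st.2.1, st.2.2 + 1)          -- missing += 1; continue
      else if st.1.contains key then (st.1, st.2.1 ++ [key], st.2.2)  -- duplicates.append
      else (st.1.insert key row, st.2.1, st.2.2))
    (PySem.Dict.empty, ([], 0))
  if st.2.2 ≠ 0 then []        -- raise ValueError (missing): outside Pre_
  else if st.2.1 ≠ [] then []  -- raise ValueError (duplicates): outside Pre_
  else st.1.items

-- ===== PORT B =====
def index_rows_py_alt (rows : List (List (String × String))) (label : String) : List (String × List (String × String)) :=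
  let keys := rows.map rowKey
  let missing : Int := (PySem.List.count keys "" : Int)
  if missing ≠ 0 then []       -- raise ValueError (missing): outside Pre_
  else
    let dupKeys := PySem.List.sorted
      (PySem.Set.ofList (keys.filter (fun k => PySem.List.count keys k > 1)))
      (fun x => x) false
    if dupKeys ≠ [] then []    -- raise ValueError (duplicates): outside Pre_
    else
      ((keys.zip rows).foldl
        (fun (d : PySem.Dict String (List (String × String))) p => d.setdefault p.1 p.2)
        PySem.Dict.empty).items

-- ===== PRECONDITION & SPEC =====
-- Pre_ = exactly the inputs where A returns: every row has a nonempty key and all keys are distinct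
-- (otherwise A raises ValueError).
def Pre_index_rows_py (rows : List (List (String × String))) (label : String) : Prop :=
  (∀ r ∈ rows, rowKey r ≠ "") ∧ (rows.map rowKey).Nodup

instance (rows : List (List (String × String))) (label : String) : Decidable (Pre_index_rows_py rows label) := by
  unfold Pre_index_rows_py; infer_instance

def pvWitness_index_rows_py : (List (List (String × String))) × String :=
  ([[("num_convenio", "42"), ("x", "u")], [("num_convenio", ""), ("cod_tci", "7")]], "base")

def Spec_index_rows_py (rows : List (List (String × String))) (label : String) (out : List (String × List (String × String))) : Prop := out = index_rows_py_alt rows label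
instance (rows : List (List (String × String))) (label : String) (out : List (String × List (String × String))) : Decidable (Spec_index_rows_py rows label out) := by unfold Spec_index_rows_py; infer_instance

-- ===== CLAIM (what is proved, stated in full; the proofs are below) =====
def Claim_equal_index_rows_py : Prop := ∀ (rows : List (List (String × String))) (label : String), Dom_index_rows_py rows label → Pre_index_rows_py rows label → Spec_index_rows_py rows label (index_rows_py rows label)

-- ===== LEMMAS AND PROOFS =====

-- A's loop, under Pre_, is a plain fold of inserts.
theorem loopA (rows : List (List (String × String)))
    (d : PySem.Dict String (List (String × String))) (dups : List String) (m : Int)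
    (hkeys : ∀ r ∈ rows, rowKey r ≠ "")
    (hnd : (rows.map rowKey).Nodup)
    (hfree : ∀ r ∈ rows, d.contains (rowKey r) = false) :
    rows.foldl
      (fun (st : PySem.Dict String (List (String × String)) × List String × Int) row =>
        let key := rowKey row
        if key = "" then (st.1, st.2.1, st.2.2 + 1)
        else if st.1.contains key then (st.1, st.2.1 ++ [key], st.2.2)
        else (st.1.insert key row, st.2.1, st.2.2))
      (d, (dups, m))
    = (rows.foldl (fun d r => d.insert (rowKey r) r) d, (dups, m)) := by
  induction rows generalizing d with
  | nil => rfl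
  | cons r rs ih =>
    simp only [List.map_cons, List.nodup_cons] at hnd
    have hk : rowKey r ≠ "" := hkeys r (List.mem_cons_self ..)
    have hc : d.contains (rowKey r) = false := hfree r (List.mem_cons_self ..)
    simp only [List.foldl_cons, if_neg hk, hc, Bool.false_eq_true, if_false]
    exact ih (d.insert (rowKey r) r)
      (fun x hx => hkeys x (List.mem_cons_of_mem _ hx))
      hnd.2
      (fun x hx => by
        rw [PySem.Dict.contains_insert]
        have hne : rowKey x ≠ rowKey r := by
          intro h; exact hnd.1 (h ▸ List.mem_map_of_mem hx)
        simp [hne, hfree x (List.mem_cons_of_mem _ hx)])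

-- B's setdefault loop over zip(keys, rows), under distinct fresh keys, is the same fold of inserts.
theorem loopB (rows : List (List (String × String)))
    (d : PySem.Dict String (List (String × String)))
    (hnd : (rows.map rowKey).Nodup)
    (hfree : ∀ r ∈ rows, d.contains (rowKey r) = false) :
    ((rows.map rowKey).zip rows).foldl
      (fun (d : PySem.Dict String (List (String × String))) p => d.setdefault p.1 p.2) d
    = rows.foldl (fun d r => d.insert (rowKey r) r) d := by
  induction rows generalizing d with
  | nil => rfl
  | cons r rs ih =>
    simp only [List.map_cons, List.nodup_cons] at hnd
    have hc : d.contains (rowKey r) = false := hfree r (List.mem_cons_self ..)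
    simp only [List.map_cons, List.zip_cons_cons, List.foldl_cons]
    rw [PySem.Dict.setdefault_of_not_contains d r hc]
    exact ih (d.insert (rowKey r) r) hnd.2
      (fun x hx => by
        rw [PySem.Dict.contains_insert]
        have hne : rowKey x ≠ rowKey r := by
          intro h; exact hnd.1 (h ▸ List.mem_map_of_mem hx)
        simp [hne, hfree x (List.mem_cons_of_mem _ hx)])

-- ===== VERDICT (by name: the statement is the Claim_ definition above) =====
theorem index_rows_py_spec : Claim_equal_index_rows_py := by
  intro rows label _ hpre
  obtain ⟨hkeys, hnd⟩ := hpre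
  unfold Spec_index_rows_py index_rows_py index_rows_py_alt
  -- A side: the loop never touches the duplicate list or the missing counter
  rw [loopA rows PySem.Dict.empty [] 0 hkeys hnd (fun r _ => PySem.Dict.contains_empty _)]
  -- B side: missing count is 0
  have hmiss : PySem.List.count (rows.map rowKey) "" = 0 := by
    rw [PySem.List.count_eq, List.count_eq_zero]
    intro h
    obtain ⟨r, hr, hk⟩ := List.mem_map.mp h
    exact hkeys r hr hk
  -- B side: no key occurs more than once
  have hfilter : (rows.map rowKey).filter (fun k => PySem.List.count (rows.map rowKey) k > 1) = [] := by
    apply List.filter_eq_nil_iff.mpr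
    intro k hk
    have := List.nodup_iff_count_le_one.mp hnd k
    simp only [PySem.List.count_eq, decide_eq_true_eq, not_lt]
    omega
  have hsort : PySem.List.sorted (PySem.Set.ofList ([] : List String)) (fun x => x) false = [] := rfl
  simp only [hmiss, hfilter, hsort, Int.natCast_zero, ne_eq, not_true_eq_false, if_false]
  rw [loopB rows PySem.Dict.empty hnd (fun r _ => PySem.Dict.contains_empty _)]
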